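-- pv_equiv track=rewrite | github.com/brianv0/gavo | gavo/votable/dec_binary.py | tokenizeComplexArr
-- ===== SOURCE A (Python) =====
-- def tokenizeComplexArr(val):
-- 	"""iterates over suitable number literal pairs from val.
-- 	"""
-- 	last = None
-- 	if val is None:
-- 		return
-- 	for item in val.split():
-- 		if not item:
-- 			continue
-- 		if last is None:
-- 			last = item
-- 		else:
-- 			yield "%s %s"%(last, item)
-- 			last = None
-- 	if last:
-- 		yield last
-- ===== SOURCE B (Python) =====
-- def tokenizeComplexArr(val):
--     """iterates over suitable number literal pairs from val."""
--     if val is None: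
--         return
--     toks = val.split()
--     it = iter(toks)
--     for a, b in zip(it, it):
--         yield "%s %s" % (a, b)
--     if len(toks) % 2:
--         yield toks[-1]
-- ===== Notes on version B (the rewrite author's own statement) =====
-- stated objective: idiomatic
-- what changed: B splits the string once and pairs the token list structurally (zip of an iterator with itself, then the odd trailing token), replacing A's stateful one-at-a-time pending-token toggle with a list-then-grouped-pass decomposition.
import Mathlib
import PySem

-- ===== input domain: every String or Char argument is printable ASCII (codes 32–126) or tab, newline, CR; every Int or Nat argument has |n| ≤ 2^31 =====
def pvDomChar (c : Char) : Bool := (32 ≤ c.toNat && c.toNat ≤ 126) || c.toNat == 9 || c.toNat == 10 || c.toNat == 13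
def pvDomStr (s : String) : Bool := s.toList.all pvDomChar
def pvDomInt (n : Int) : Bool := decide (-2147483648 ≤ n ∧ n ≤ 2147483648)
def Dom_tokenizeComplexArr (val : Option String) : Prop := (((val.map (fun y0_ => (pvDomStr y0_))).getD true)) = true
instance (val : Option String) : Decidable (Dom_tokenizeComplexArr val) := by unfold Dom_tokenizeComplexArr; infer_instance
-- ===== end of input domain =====

-- B pairs the once-split token list structurally (zip(it, it) + odd trailing token)
-- instead of A's stateful 'last' toggle; objective: more idiomatic decomposition.

-- ===== PORT A =====
-- one loop step: skip empty items, otherwise toggle the pending 'last' token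
def tcaStepA (s : List String × Option String) (item : String) : List String × Option String :=
  if item = "" then s
  else match s.2 with
    | none => (s.1, some item)
    | some last => (s.1 ++ [last ++ " " ++ item], none)

def tokenizeComplexArr (val : Option String) : List String :=
  match val with
  | none => []
  | some v =>
    let r := (PySem.Str.split₀ v).foldl tcaStepA ([], none)
    match r.2 with
    | none => r.1
    | some last => if last = "" then r.1 else r.1 ++ [last]   -- `if last:` truthiness

-- ===== PORT B =====
-- `for a, b in zip(it, it): yield a+" "+b` plus the odd trailing token
def tcaPairUp : List String → List String
  | a :: b :: rest => (a ++ " " ++ b) :: tcaPairUp rest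
  | [a] => [a]
  | [] => []

def tokenizeComplexArr_alt (val : Option String) : List String :=
  match val with
  | none => []
  | some v => tcaPairUp (PySem.Str.split₀ v)

-- ===== PRECONDITION & SPEC =====
def Spec_tokenizeComplexArr (val : Option String) (out : List String) : Prop := out = tokenizeComplexArr_alt val
instance (val : Option String) (out : List String) : Decidable (Spec_tokenizeComplexArr val out) := by unfold Spec_tokenizeComplexArr; infer_instance

-- ===== CLAIM (what is proved, stated in full; the proofs are below) =====
def Claim_equal_tokenizeComplexArr : Prop := ∀ (val : Option String), Dom_tokenizeComplexArr val → Spec_tokenizeComplexArr val (tokenizeComplexArr val)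

-- ===== LEMMAS AND PROOFS =====

-- split() pieces (char-level) are never empty
theorem tcaSplitGo_ne_nil (s : List Char) : ∀ (cur : List Char) (acc : List (List Char)),
    (∀ t ∈ acc, t ≠ []) → (cur ≠ [] ∨ cur = []) →
    ∀ t ∈ PySem.Chars.split₀.go s cur acc, t ≠ [] := by
  induction s with
  | nil =>
    intro cur acc hacc _ t ht
    unfold PySem.Chars.split₀.go at ht
    by_cases hc : cur.isEmpty = true
    · simp [hc] at ht
      exact hacc t ht
    · simp [hc] at ht
      rcases ht with h | h
      · exact hacc t h
      · subst h
        simp [List.isEmpty_iff] at hc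
        simpa using hc
  | cons c rest ih =>
    intro cur acc hacc _ t ht
    unfold PySem.Chars.split₀.go at ht
    by_cases hsp : PySem.Chars.isspace c = true
    · by_cases hc : cur.isEmpty = true
      · simp [hsp, hc] at ht
        exact ih [] acc hacc (Or.inr rfl) t ht
      · simp [hsp, hc] at ht
        refine ih [] (cur.reverse :: acc) ?_ (Or.inr rfl) t ht
        intro u hu
        rcases List.mem_cons.mp hu with h | h
        · subst h
          simp [List.isEmpty_iff] at hc
          simpa using hc
        · exact hacc u h
    · simp [hsp] at ht
      exact ih (c :: cur) acc hacc (Or.inl (by simp)) t ht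

theorem tcaSplit₀_ne_empty (v : String) : ∀ t ∈ PySem.Str.split₀ v, t ≠ "" := by
  intro t ht
  unfold PySem.Str.split₀ at ht
  rcases List.mem_map.mp ht with ⟨cs, hcs, rfl⟩
  have hne : cs ≠ [] :=
    tcaSplitGo_ne_nil v.toList [] [] (by simp) (Or.inr rfl) cs hcs
  intro h
  apply hne
  have : (String.ofList cs).toList = ("" : String).toList := by rw [h]
  simpa using this

-- continuation form of tcaPairUp: a pending first element l in front of toks
def tcaPairCont (l : String) : List String → List String
  | [] => [l]
  | b :: rest => (l ++ " " ++ b) :: tcaPairUp rest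

theorem tcaPairUp_cons (t : String) (rest : List String) :
    tcaPairUp (t :: rest) = tcaPairCont t rest := by
  cases rest <;> rfl

-- A's fold + final flush equals B's structural pairing
theorem tcaFold_eq : ∀ (toks : List String) (acc : List String) (last : Option String),
    (∀ t ∈ toks, t ≠ "") → (∀ l, last = some l → l ≠ "") →
    (match (toks.foldl tcaStepA (acc, last)).2 with
      | none => (toks.foldl tcaStepA (acc, last)).1
      | some l => if l = "" then (toks.foldl tcaStepA (acc, last)).1
                  else (toks.foldl tcaStepA (acc, last)).1 ++ [l])
    = acc ++ (match last with
      | none => tcaPairUp toks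
      | some l => tcaPairCont l toks) := by
  intro toks
  induction toks with
  | nil =>
    intro acc last _ hlast
    cases last with
    | none => simp [tcaPairUp]
    | some l =>
      have : l ≠ "" := hlast l rfl
      simp [tcaPairCont, this]
  | cons t rest ih =>
    intro acc last htoks hlast
    have ht : t ≠ "" := htoks t (by simp)
    have hrest : ∀ u ∈ rest, u ≠ "" := fun u hu => htoks u (by simp [hu])
    cases last with
    | none =>
      have hstep : tcaStepA (acc, none) t = (acc, some t) := by
        simp [tcaStepA, ht]
      rw [List.foldl_cons, hstep,
        ih acc (some t) hrest (by intro l hl; injection hl with h; exact h ▸ ht),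
        tcaPairUp_cons]
    | some l =>
      have hstep : tcaStepA (acc, some l) t = (acc ++ [l ++ " " ++ t], none) := by
        simp [tcaStepA, ht]
      rw [List.foldl_cons, hstep,
        ih (acc ++ [l ++ " " ++ t]) none hrest (by intro l hl; cases hl)]
      simp [tcaPairCont]

-- ===== VERDICT (by name: the statement is the Claim_ definition above) =====
theorem tokenizeComplexArr_spec : Claim_equal_tokenizeComplexArr := by
  intro val _
  unfold Spec_tokenizeComplexArr
  cases val with
  | none => rfl
  | some v =>
    show (match (PySem.Str.split₀ v).foldl tcaStepA ([], none) with
      | r => match r.2 with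
        | none => r.1
        | some last => if last = "" then r.1 else r.1 ++ [last]) = _
    have := tcaFold_eq (PySem.Str.split₀ v) [] none (tcaSplit₀_ne_empty v)
      (by intro l hl; cases hl)
    simpa [tokenizeComplexArr_alt] using this
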